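-- pv_equiv track=rewrite | github.com/CodingProgrammer/HackerRank_Python | (Greedy)Jim_and_the_Orders.py | jimOrders
-- ===== SOURCE A (Python) =====
-- def jimOrders(orders, n):
--     bucket = {}
--     for i in range(n):
--         key = str(sum(orders[i]))
--         if key not in bucket.keys():
--             bucket[key] = []
--         bucket[key].append(i + 1)
--     result = [each for j in sorted(bucket.keys(), key = int) for each in bucket[j]]
--     return result
-- ===== SOURCE B (Python) =====
-- def jimOrders(orders, n):
--     return sorted(range(1, n + 1), key=lambda c: sum(orders[c - 1]))
-- ===== Notes on version B (the rewrite author's own statement) =====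
-- stated objective: simpler
-- what changed: B drops A's str(sum)-keyed grouping dictionary, numeric key sort and flatten entirely and instead returns the indices 1..n stably sorted by their total order time, relying on sort stability for A's tie order.
import Mathlib
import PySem

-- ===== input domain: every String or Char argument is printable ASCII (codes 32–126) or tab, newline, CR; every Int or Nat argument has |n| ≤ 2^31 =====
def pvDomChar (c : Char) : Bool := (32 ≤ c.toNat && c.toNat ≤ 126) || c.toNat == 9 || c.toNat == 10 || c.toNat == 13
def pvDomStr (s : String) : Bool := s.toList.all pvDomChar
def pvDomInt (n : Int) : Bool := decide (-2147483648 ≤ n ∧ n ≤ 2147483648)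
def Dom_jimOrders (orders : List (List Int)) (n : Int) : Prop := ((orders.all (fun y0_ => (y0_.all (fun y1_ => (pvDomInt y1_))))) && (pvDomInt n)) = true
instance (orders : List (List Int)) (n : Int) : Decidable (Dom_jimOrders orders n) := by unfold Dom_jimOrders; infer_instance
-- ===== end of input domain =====

-- B replaces A's str-keyed grouping dict, key-sort and flatten by one stable sort of the
-- customer indices 1..n keyed by their total order time (objective: simpler).

-- ===== PORT A =====
def jimOrders (orders : List (List Int)) (n : Int) : List Int :=
  let bucket : PySem.Dict String (List Int) :=
    (PySem.List.pyRange 0 n 1).foldl (fun bucket i =>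
      let key := PySem.Int.toStr (PySem.List.pyGetD orders i []).sum
      let bucket1 := if bucket.contains key then bucket else bucket.insert key []
      bucket1.modify key [] (fun l => l ++ [i + 1])) PySem.Dict.empty
  (PySem.List.sorted bucket.keys (fun j => (PySem.Int.ofStr? j).getD 0) false).flatMap
    (fun j => bucket.getD j [])

-- ===== PORT B =====
def jimOrders_alt (orders : List (List Int)) (n : Int) : List Int :=
  PySem.List.sorted (PySem.List.pyRange 1 (n + 1) 1)
    (fun c => (PySem.List.pyGetD orders (c - 1) []).sum) false

-- ===== PRECONDITION & SPEC =====
-- Pre_ excludes exactly the inputs where Python A raises IndexError (n exceeds len(orders));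
-- Python B raises there too.
def Pre_jimOrders (orders : List (List Int)) (n : Int) : Prop := n ≤ (orders.length : Int)
instance (orders : List (List Int)) (n : Int) : Decidable (Pre_jimOrders orders n) := by
  unfold Pre_jimOrders; infer_instance

def pvWitness_jimOrders : List (List Int) × Int := ([[1, 2], [3], [0]], 3)

def Spec_jimOrders (orders : List (List Int)) (n : Int) (out : List Int) : Prop := out = jimOrders_alt orders n
instance (orders : List (List Int)) (n : Int) (out : List Int) : Decidable (Spec_jimOrders orders n out) := by unfold Spec_jimOrders; infer_instance

-- ===== CLAIM (what is proved, stated in full; the proofs are below) =====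
def Claim_equal_jimOrders : Prop := ∀ (orders : List (List Int)) (n : Int), Dom_jimOrders orders n → Pre_jimOrders orders n → Spec_jimOrders orders n (jimOrders orders n)

-- ===== LEMMAS AND PROOFS =====

-- ---------- part 1: int(str(v)) = v for the private parser behind PySem.Int.ofStr? ----------

def valFrom (acc : Nat) (cs : List Char) : Nat := cs.foldl (fun a c => a * 10 + (c.toNat - 48)) acc

theorem isIntSpace_of_isDigit (c : Char) (h : c.isDigit = true) : PySem.Int.isIntSpace c = false := by
  simp only [PySem.Int.isIntSpace, Bool.or_eq_false_iff, decide_eq_false_iff_not]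
  refine ⟨⟨⟨⟨⟨?_, ?_⟩, ?_⟩, ?_⟩, ?_⟩, ?_⟩ <;> (rintro rfl; exact absurd h (by decide))

theorem dropWhile_isIntSpace_nospace (l : List Char) (h : ∀ c ∈ l, PySem.Int.isIntSpace c = false) :
    List.dropWhile PySem.Int.isIntSpace l = l := by
  cases l with
  | nil => rfl
  | cons c t => rw [List.dropWhile_cons, h c (by simp)]; simp

theorem char_toNat_inj (c d : Char) (h : c.toNat = d.toNat) : c = d := by
  rcases c with ⟨⟨cv⟩, hc⟩; rcases d with ⟨⟨dv⟩, hd⟩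
  simp only [Char.toNat, UInt32.toNat] at h
  congr 2
  exact BitVec.toNat_injective h

theorem digit_cases (c : Char) (h : c.isDigit = true) :
    c = '0' ∨ c = '1' ∨ c = '2' ∨ c = '3' ∨ c = '4' ∨ c = '5' ∨ c = '6' ∨ c = '7' ∨ c = '8' ∨ c = '9' := by
  simp only [Char.isDigit, Bool.and_eq_true, decide_eq_true_eq] at h
  have h1 : 48 ≤ c.toNat := Fin.mk_le_mk.mp h.1
  have h2 : c.toNat ≤ 57 := Fin.mk_le_mk.mp h.2
  have h3 : c.toNat = 48 ∨ c.toNat = 49 ∨ c.toNat = 50 ∨ c.toNat = 51 ∨ c.toNat = 52 ∨ c.toNat = 53 ∨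
      c.toNat = 54 ∨ c.toNat = 55 ∨ c.toNat = 56 ∨ c.toNat = 57 := by omega
  rcases h3 with h|h|h|h|h|h|h|h|h|h
  · exact Or.inl (char_toNat_inj _ _ h)
  · exact Or.inr <| Or.inl (char_toNat_inj _ _ h)
  · exact Or.inr <| Or.inr <| Or.inl (char_toNat_inj _ _ h)
  · exact Or.inr <| Or.inr <| Or.inr <| Or.inl (char_toNat_inj _ _ h)
  · exact Or.inr <| Or.inr <| Or.inr <| Or.inr <| Or.inl (char_toNat_inj _ _ h)
  · exact Or.inr <| Or.inr <| Or.inr <| Or.inr <| Or.inr <| Or.inl (char_toNat_inj _ _ h)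
  · exact Or.inr <| Or.inr <| Or.inr <| Or.inr <| Or.inr <| Or.inr <| Or.inl (char_toNat_inj _ _ h)
  · exact Or.inr <| Or.inr <| Or.inr <| Or.inr <| Or.inr <| Or.inr <| Or.inr <| Or.inl (char_toNat_inj _ _ h)
  · exact Or.inr <| Or.inr <| Or.inr <| Or.inr <| Or.inr <| Or.inr <| Or.inr <| Or.inr <| Or.inl (char_toNat_inj _ _ h)
  · exact Or.inr <| Or.inr <| Or.inr <| Or.inr <| Or.inr <| Or.inr <| Or.inr <| Or.inr <| Or.inr (char_toNat_inj _ _ h)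

theorem parse_go (G : List Char → Bool → Nat → Option Nat)
    (hnil : ∀ acc, G [] true acc = some acc)
    (hcons : ∀ c rest acc, c.isDigit = true → G (c :: rest) true acc = G rest true (acc * 10 + (c.toNat - 48))) :
    ∀ ds acc, (∀ c ∈ ds, c.isDigit = true) → G ds true acc = some (valFrom acc ds) := by
  intro ds
  induction ds with
  | nil => intro acc _; simpa [valFrom] using hnil acc
  | cons d t ih =>
    intro acc hall
    rw [hcons d t acc (hall d (by simp)), ih _ (fun c hc => hall c (List.mem_cons_of_mem _ hc))]
    rfl

theorem parse_top (G : List Char → Bool → Nat → Option Nat)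
    (hnil : ∀ acc, G [] true acc = some acc)
    (hconsT : ∀ c rest acc, c.isDigit = true → G (c :: rest) true acc = G rest true (acc * 10 + (c.toNat - 48)))
    (ds : List Char) (acc : Nat) (hall : ∀ c ∈ ds, c.isDigit = true) :
    Option.map (fun n : Int => n) ((G ds true acc).bind fun a : Nat => some ((a : Nat) : Int)) =
      some ((valFrom acc ds : Nat) : Int) := by
  rw [parse_go G hnil hconsT ds _ hall]
  rfl

theorem parse_top_neg (G : List Char → Bool → Nat → Option Nat)
    (hnil : ∀ acc, G [] true acc = some acc)
    (hconsT : ∀ c rest acc, c.isDigit = true → G (c :: rest) true acc = G rest true (acc * 10 + (c.toNat - 48)))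
    (ds : List Char) (acc : Nat) (hall : ∀ c ∈ ds, c.isDigit = true) :
    Option.map (fun n : Int => -n) ((G ds true acc).bind fun a : Nat => some ((a : Nat) : Int)) =
      some (-((valFrom acc ds : Nat) : Int)) := by
  rw [parse_go G hnil hconsT ds _ hall]
  rfl

theorem ofChars_digits (d : Char) (ds : List Char) (hd : d.isDigit = true)
    (hall : ∀ c ∈ ds, c.isDigit = true) :
    PySem.Int.ofChars? (d :: ds) = some ((valFrom 0 (d :: ds) : Nat) : Int) := by
  have hallc : ∀ c ∈ d :: ds, c.isDigit = true := by
    intro c hc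
    rcases List.mem_cons.mp hc with rfl | hc
    · exact hd
    · exact hall c hc
  have hns : ∀ c ∈ d :: ds, PySem.Int.isIntSpace c = false := fun c hc => isIntSpace_of_isDigit c (hallc c hc)
  simp only [PySem.Int.ofChars?]
  rw [dropWhile_isIntSpace_nospace _ hns, dropWhile_isIntSpace_nospace _
    (fun c hc => hns c (List.mem_reverse.mp hc)), List.reverse_reverse]
  rcases digit_cases d hd with rfl|rfl|rfl|rfl|rfl|rfl|rfl|rfl|rfl|rfl <;>
  · apply parse_top
    · exact fun _ => rfl
    · intro c rest acc h
      rcases digit_cases c h with rfl|rfl|rfl|rfl|rfl|rfl|rfl|rfl|rfl|rfl <;> rfl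
    · exact hall

theorem ofChars_neg_digits (d : Char) (ds : List Char) (hd : d.isDigit = true)
    (hall : ∀ c ∈ ds, c.isDigit = true) :
    PySem.Int.ofChars? ('-' :: d :: ds) = some (-((valFrom 0 (d :: ds) : Nat) : Int)) := by
  have hallc : ∀ c ∈ d :: ds, c.isDigit = true := by
    intro c hc
    rcases List.mem_cons.mp hc with rfl | hc
    · exact hd
    · exact hall c hc
  have hns : ∀ c ∈ '-' :: d :: ds, PySem.Int.isIntSpace c = false := by
    intro c hc
    rcases List.mem_cons.mp hc with rfl | hc
    · decide
    · exact isIntSpace_of_isDigit c (hallc c hc)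
  simp only [PySem.Int.ofChars?]
  rw [dropWhile_isIntSpace_nospace _ hns, dropWhile_isIntSpace_nospace _
    (fun c hc => hns c (List.mem_reverse.mp hc)), List.reverse_reverse]
  rcases digit_cases d hd with rfl|rfl|rfl|rfl|rfl|rfl|rfl|rfl|rfl|rfl <;>
  · apply parse_top_neg
    · exact fun _ => rfl
    · intro c rest acc h
      rcases digit_cases c h with rfl|rfl|rfl|rfl|rfl|rfl|rfl|rfl|rfl|rfl <;> rfl
    · exact hall

theorem digitChar_toNat (k : Nat) (hk : k < 10) : (Nat.digitChar k).toNat - 48 = k := by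
  interval_cases k <;> decide

theorem valFrom_append (xs : List Char) (d : Char) (acc : Nat) :
    valFrom acc (xs ++ [d]) = valFrom acc xs * 10 + (d.toNat - 48) := by
  simp [valFrom, List.foldl_append]

theorem valFrom_toDigits (m : Nat) : valFrom 0 (Nat.toDigits 10 m) = m := by
  induction m using Nat.strong_induction_on with
  | _ m ih =>
    rcases Nat.lt_or_ge m 10 with hm | hm
    · rw [Nat.toDigits_of_lt_base hm]
      interval_cases m <;> decide
    · rw [Nat.toDigits_of_base_le (by norm_num) hm, valFrom_append,
        ih (m / 10) (by omega), digitChar_toNat _ (Nat.mod_lt _ (by norm_num))]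
      omega

theorem toDigits_all_digit (m : Nat) : ∀ c ∈ Nat.toDigits 10 m, c.isDigit = true :=
  fun _ hc => Nat.isDigit_of_mem_toDigits (by norm_num) (by norm_num) hc

theorem int_roundtrip (v : Int) : PySem.Int.ofStr? (PySem.Int.toStr v) = some v := by
  rw [PySem.Int.toStr, PySem.Int.ofStr?_ofList]
  by_cases hv : v < 0
  · rw [PySem.Int.toChars, if_pos hv]
    obtain ⟨d, t, hdt⟩ := List.exists_cons_of_ne_nil
      (List.ne_nil_of_length_pos (Nat.length_toDigits_pos (b := 10) (n := v.natAbs)))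
    rw [hdt]
    have hall := toDigits_all_digit v.natAbs
    rw [hdt] at hall
    rw [ofChars_neg_digits d t (hall d (by simp)) (fun c hc => hall c (List.mem_cons_of_mem _ hc))]
    have hval : valFrom 0 (d :: t) = v.natAbs := by rw [← hdt]; exact valFrom_toDigits v.natAbs
    rw [hval]
    congr 1
    omega
  · rw [PySem.Int.toChars, if_neg hv]
    obtain ⟨d, t, hdt⟩ := List.exists_cons_of_ne_nil
      (List.ne_nil_of_length_pos (Nat.length_toDigits_pos (b := 10) (n := v.toNat)))
    rw [hdt]
    have hall := toDigits_all_digit v.toNat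
    rw [hdt] at hall
    rw [ofChars_digits d t (hall d (by simp)) (fun c hc => hall c (List.mem_cons_of_mem _ hc))]
    have hval : valFrom 0 (d :: t) = v.toNat := by rw [← hdt]; exact valFrom_toDigits v.toNat
    rw [hval]
    congr 1
    omega

theorem int_of_toStr (v : Int) : (PySem.Int.ofStr? (PySem.Int.toStr v)).getD 0 = v := by
  rw [int_roundtrip]; rfl

-- ---------- part 2: grouping by str(sum) + numeric key sort + flatten  =  one stable sort ----------

theorem insertBy_nil {α : Type} (before : α → α → Bool) (x : α) :
    PySem.List.insertBy before x [] = [x] := rfl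

theorem insertBy_cons {α : Type} (before : α → α → Bool) (x y : α) (ys : List α) :
    PySem.List.insertBy before x (y :: ys) =
      if before x y then x :: y :: ys else y :: PySem.List.insertBy before x ys := rfl

-- stability: inserting a positionally-larger element keeps the lexicographic (key, position) order
theorem insertBy_pairwise_lex (f : Int → Int) (x : Int) (ys : List Int)
    (hp : ys.Pairwise (fun a b => f a < f b ∨ (f a = f b ∧ a ≤ b)))
    (hlt : ∀ y ∈ ys, y < x) :
    (PySem.List.insertBy (fun a b => decide (f a < f b)) x ys).Pairwise
      (fun a b => f a < f b ∨ (f a = f b ∧ a ≤ b)) := by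
  induction ys with
  | nil => simp [insertBy_nil]
  | cons y ys ih =>
    rw [insertBy_cons]
    by_cases hxy : f x < f y
    · rw [if_pos (by simpa using hxy)]
      constructor
      · intro z hz
        rcases List.mem_cons.mp hz with rfl | hz
        · exact Or.inl hxy
        · rcases List.rel_of_pairwise_cons hp hz with h | ⟨h, _⟩
          · exact Or.inl (lt_of_lt_of_le hxy (le_of_lt h))
          · exact Or.inl (h ▸ hxy)
      · exact hp
    · rw [if_neg (by simpa using hxy)]
      constructor
      · intro z hz
        rcases (PySem.List.mem_insertBy _ _ _ _).mp hz with rfl | hz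
        · rcases lt_or_eq_of_le (not_lt.mp hxy) with h | h
          · exact Or.inl h
          · exact Or.inr ⟨h.symm ▸ rfl, le_of_lt (hlt y (by simp))⟩
        · exact List.rel_of_pairwise_cons hp hz
      · exact ih (List.Pairwise.of_cons hp) (fun z hz => hlt z (List.mem_cons_of_mem _ hz))

theorem sorted_pairwise_lex (L : List Int) (f : Int → Int) (hL : L.Pairwise (· < ·)) :
    (PySem.List.sorted L f false).Pairwise (fun a b => f a < f b ∨ (f a = f b ∧ a ≤ b)) := by
  induction L using List.reverseRecOn with
  | nil => simp [PySem.List.sorted_eq_foldl_insertBy]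
  | append_singleton xs x ih =>
    rw [PySem.List.sorted_eq_foldl_insertBy, List.foldl_append, List.foldl_cons, List.foldl_nil,
      ← PySem.List.sorted_eq_foldl_insertBy]
    have hsplit := List.pairwise_append.mp hL
    refine insertBy_pairwise_lex f x (PySem.List.sorted xs f false) (ih hsplit.1) ?_
    intro y hy
    exact hsplit.2.2 y ((PySem.List.mem_sorted xs f false y).mp hy) x (by simp)

theorem count_filter_eq (x : Int) (p : Int → Bool) (L : List Int) :
    (L.filter p).count x = if p x then L.count x else 0 := by
  by_cases hp : p x
  · rw [if_pos hp, List.count_filter hp]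
  · rw [if_neg hp]
    refine List.count_eq_zero.mpr ?_
    intro hmem
    exact hp (List.of_mem_filter hmem)

theorem sum_map_ite_single (t : String) (m : Nat) :
    ∀ (S : List String), S.Nodup → t ∈ S →
      (S.map (fun s => if t == s then m else 0)).sum = m := by
  intro S
  induction S with
  | nil => intro _ h; cases h
  | cons s S ih =>
    intro hnd hmem
    rcases List.mem_cons.mp hmem with rfl | hmem
    · simp only [List.map_cons, List.sum_cons, BEq.rfl, if_pos]
      have hz0 : (S.map (fun s' => if t == s' then m else 0)).sum = 0 := by
        refine List.sum_eq_zero ?_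
        intro z hz
        obtain ⟨s', hs', hz'⟩ := List.mem_map.mp hz
        rw [← hz']
        have hne : ¬ (t == s') = true := by
          intro hb
          have : t ∈ S := by rw [beq_iff_eq.mp hb]; exact hs'
          exact (List.nodup_cons.mp hnd).1 this
        simp [hne]
      omega
    · have hts : ¬ (t == s) = true := by
        intro hb
        have : s ∈ S := by rw [← beq_iff_eq.mp hb]; exact hmem
        exact (List.nodup_cons.mp hnd).1 this
      simp only [List.map_cons, List.sum_cons, if_neg hts]
      rw [ih (List.nodup_cons.mp hnd).2 hmem]
      omega

theorem toStr_injective (a b : Int) (h : PySem.Int.toStr a = PySem.Int.toStr b) : a = b := by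
  have ha := int_of_toStr a
  rw [h, int_of_toStr b] at ha
  exact ha.symm

-- the central combinatorial fact, for an arbitrary total-time function f
theorem group_flatMap_eq_sorted (L : List Int) (f : Int → Int) (hL : L.Pairwise (· < ·)) :
    (PySem.List.sorted (PySem.Set.ofList (L.map (fun c => PySem.Int.toStr (f c))))
        (fun s => (PySem.Int.ofStr? s).getD 0) false).flatMap
      (fun s => L.filter (fun c => PySem.Int.toStr (f c) == s)) =
    PySem.List.sorted L f false := by
  set k : Int → String := fun c => PySem.Int.toStr (f c) with hk
  set g : String → Int := fun s => (PySem.Int.ofStr? s).getD 0 with hg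
  have hgk : ∀ c, g (k c) = f c := fun c => int_of_toStr (f c)
  set S : List String := PySem.Set.ofList (L.map k) with hS
  set KS : List String := PySem.List.sorted S g false with hKS
  have hKSnodup : KS.Nodup :=
    (PySem.List.sorted_perm S g false).symm.nodup (PySem.Set.nodup_ofList (L.map k))
  -- (1) the flattened grouping is a permutation of L
  have hperm : (KS.flatMap (fun s => L.filter (fun c => k c == s))).Perm L := by
    refine List.perm_iff_count.mpr ?_
    intro x
    rw [List.count_flatMap]
    have hmapeq : KS.map (List.count x ∘ fun s => L.filter (fun c => k c == s)) =
        KS.map (fun s => if k x == s then L.count x else 0) := by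
      refine List.map_congr_left ?_
      intro s _
      simp only [Function.comp]
      exact count_filter_eq x (fun c => k c == s) L
    rw [hmapeq]
    by_cases hx : x ∈ L
    · exact sum_map_ite_single (k x) (L.count x) KS hKSnodup
        ((PySem.List.mem_sorted S g false (k x)).mpr
          ((PySem.Set.mem_ofList (L.map k) (k x)).mpr (List.mem_map_of_mem hx)))
    · rw [List.count_eq_zero_of_not_mem hx]
      refine List.sum_eq_zero ?_
      intro z hz
      obtain ⟨s, _, hz'⟩ := List.mem_map.mp hz
      rw [← hz']
      split <;> rfl
  -- (2) the flattened grouping is pairwise-sorted in the (f c, c) lexicographic order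
  have hpairRA : (KS.flatMap (fun s => L.filter (fun c => k c == s))).Pairwise
      (fun a b => f a < f b ∨ (f a = f b ∧ a ≤ b)) := by
    rw [List.flatMap_def]
    refine List.pairwise_flatten.mpr ⟨?_, ?_⟩
    · intro l' hl'
      obtain ⟨s, _, hl''⟩ := List.mem_map.mp hl'
      rw [← hl'']
      refine (hL.filter _).imp_of_mem ?_
      intro a b ha hb hab
      have hka : k a = s := by have := List.of_mem_filter ha; simpa using this
      have hkb : k b = s := by have := List.of_mem_filter hb; simpa using this
      have hfab : f a = f b := toStr_injective _ _ (by
        show k a = k b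
        rw [hka, hkb])
      exact Or.inr ⟨hfab, le_of_lt hab⟩
    · rw [List.pairwise_map]
      have hKSp : KS.Pairwise (fun s1 s2 => g s1 ≤ g s2 ∧ s1 ≠ s2) :=
        (PySem.List.sorted_pairwise S g).and hKSnodup
      refine hKSp.imp ?_
      rintro s1 s2 ⟨hle, hne⟩ a ha b hb
      have hka : k a = s1 := by have := List.of_mem_filter ha; simpa using this
      have hkb : k b = s2 := by have := List.of_mem_filter hb; simpa using this
      have hfa : f a = g s1 := by rw [← hka, hgk]
      have hfb : f b = g s2 := by rw [← hkb, hgk]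
      have hfne : f a ≠ f b := by
        intro he
        refine hne ?_
        rw [← hka, ← hkb]
        show PySem.Int.toStr (f a) = PySem.Int.toStr (f b)
        rw [he]
      refine Or.inl ?_
      rw [hfa, hfb]
      refine lt_of_le_of_ne hle ?_
      intro he
      exact hfne (by rw [hfa, hfb, he])
  -- (3) B's stable sort is pairwise-sorted in the same lexicographic order
  have hpairRB := sorted_pairwise_lex L f hL
  -- (4) both are therefore THE lexicographically ordered rearrangement of L
  have hinj : Function.Injective (fun c : Int => toLex ((f c, c) : Int × Int)) := by
    intro a b h
    have := congrArg (fun x => (ofLex x).2) h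
    simpa using this
  refine PySem.List.eq_of_perm_of_pairwise_le_of_injective
    (fun c : Int => toLex ((f c, c) : Int × Int)) hinj
    (hperm.trans (PySem.List.sorted_perm L f false).symm) ?_ ?_
  · refine hpairRA.imp ?_
    intro a b hab
    rw [Prod.Lex.le_iff]
    simpa using hab
  · refine hpairRB.imp ?_
    intro a b hab
    rw [Prod.Lex.le_iff]
    simpa using hab

-- ---------- part 3: massaging port A into the grouped form ----------

theorem modify_setdefault_step (d : PySem.Dict String (List Int)) (key : String) (c : Int) :
    ((if d.contains key then d else d.insert key []).modify key [] (fun l => l ++ [c])) =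
      d.modify key [] (fun l => l ++ [c]) := by
  by_cases hc : d.contains key
  · rw [if_pos hc]
  · rw [if_neg hc]
    show (d.insert key []).insert key (((d.insert key []).getD key []) ++ [c]) =
      d.insert key ((d.getD key []) ++ [c])
    have hcf : d.contains key = false := by simpa using hc
    rw [PySem.Dict.getD_insert_self, PySem.Dict.insert_insert_self,
      PySem.Dict.getD_of_not_contains d [] hcf]

theorem pyRange_shift (n : Int) :
    (PySem.List.pyRange 0 n 1).map (· + 1) = PySem.List.pyRange 1 (n + 1) 1 := by
  rw [PySem.List.pyRange_one, PySem.List.pyRange_one, List.map_map]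
  have : n - 0 = n + 1 - 1 := by ring
  rw [this]
  refine List.map_congr_left ?_
  intro k _
  simp
  omega


theorem getD_foldl_modify_keyfn (l : List Int) (key : Int → String) (val : Int → Int)
    (d : PySem.Dict String (List Int)) (s : String) :
    (l.foldl (fun d i => d.modify (key i) [] (fun xs => xs ++ [val i])) d).getD s [] =
      d.getD s [] ++ (l.filter (fun i => key i == s)).map val := by
  have h := PySem.Dict.getD_foldl_modify_append (l.map (fun i => (key i, val i))) d s
  rw [List.foldl_map, List.filter_map, List.map_map] at h
  simpa using h

theorem filter_reindex (n : Int) (q : Int → Bool) :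
    ((PySem.List.pyRange 0 n 1).filter (fun i => q (i + 1))).map (· + 1) =
      (PySem.List.pyRange 1 (n + 1) 1).filter q := by
  rw [← pyRange_shift n, List.filter_map]
  rfl

theorem jimOrders_eq_grouped (orders : List (List Int)) (n : Int) :
    jimOrders orders n =
      (PySem.List.sorted
          (PySem.Set.ofList ((PySem.List.pyRange 1 (n + 1) 1).map
            (fun c => PySem.Int.toStr (PySem.List.pyGetD orders (c - 1) []).sum)))
          (fun s => (PySem.Int.ofStr? s).getD 0) false).flatMap
        (fun s => (PySem.List.pyRange 1 (n + 1) 1).filter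
          (fun c => PySem.Int.toStr (PySem.List.pyGetD orders (c - 1) []).sum == s)) := by
  simp only [jimOrders]
  rw [PySem.List.foldl_congr_mem _ _
    (fun (d : PySem.Dict String (List Int)) i =>
      d.modify (PySem.Int.toStr (PySem.List.pyGetD orders i []).sum) [] (fun l => l ++ [i + 1])) _
    (fun acc x _ => modify_setdefault_step acc _ _)]
  have hkeys : (List.foldl
        (fun (d : PySem.Dict String (List Int)) i =>
          d.modify (PySem.Int.toStr (PySem.List.pyGetD orders i []).sum) [] fun l => l ++ [i + 1])
        PySem.Dict.empty (PySem.List.pyRange 0 n 1)).keys =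
      PySem.Set.ofList ((PySem.List.pyRange 1 (n + 1) 1).map
        (fun c => PySem.Int.toStr (PySem.List.pyGetD orders (c - 1) []).sum)) := by
    rw [PySem.Dict.keys_foldl_modify_key (PySem.List.pyRange 0 n 1)
      (fun i => PySem.Int.toStr (PySem.List.pyGetD orders i []).sum) []
      (fun _ i => fun l => l ++ [i + 1]) PySem.Dict.empty]
    rw [PySem.Dict.keys_empty, ← pyRange_shift n, List.map_map]
    show PySem.Set.update [] _ = _
    rw [PySem.Set.ofList_eq_foldl]
    show List.foldl _ _ _ = List.foldl _ _ _
    congr 1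
    refine List.map_congr_left ?_
    intro i _
    simp only [Function.comp]
    rw [add_sub_cancel_right]
  rw [hkeys]
  refine List.flatMap_congr ?_
  intro s hs
  rw [getD_foldl_modify_keyfn (PySem.List.pyRange 0 n 1)
    (fun i => PySem.Int.toStr (PySem.List.pyGetD orders i []).sum) (fun i => i + 1)
    PySem.Dict.empty s]
  have h2 := filter_reindex n (fun c => PySem.Int.toStr (PySem.List.pyGetD orders (c - 1) []).sum == s)
  simp only [add_sub_cancel_right] at h2
  rw [← h2]
  simp [PySem.Dict.getD_empty]

-- ===== VERDICT (by name: the statement is the Claim_ definition above) =====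
theorem jimOrders_spec : Claim_equal_jimOrders := by
  intro orders n _ _
  unfold Spec_jimOrders
  rw [jimOrders_eq_grouped, jimOrders_alt,
    group_flatMap_eq_sorted _ _ (PySem.List.pairwise_lt_pyRange_one 1 (n + 1))]
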